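-- pv_equiv track=rewrite | github.com/BaZom/VroomSniffer | services/statistics_service.py | categorize_prices
-- ===== SOURCE A (Python) =====
-- def categorize_prices(prices):
--     """
--     Categorize prices into budget ranges.
--
--     Args:
--         prices: List of numeric prices
--
--     Returns:
--         Dictionary with counts by category
--     """
--     low_price = len([p for p in prices if p < 10000])
--     mid_price = len([p for p in prices if 10000 <= p < 25000])
--     high_price = len([p for p in prices if p >= 25000])
--
--     return {
--         'low': low_price,
--         'mid': mid_price,
--         'high': high_price
--     }
-- ===== SOURCE B (Python) =====
-- def categorize_prices(prices):
--     low = mid = high = 0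
--     for p in prices:
--         if p < 10000:
--             low += 1
--         elif p < 25000:
--             mid += 1
--         else:
--             high += 1
--     return {'low': low, 'mid': mid, 'high': high}
-- ===== Notes on version B (the rewrite author's own statement) =====
-- stated objective: simpler
-- what changed: Replaces three separate full comprehension scans (one per bucket) with a single loop dispatching each price into one of three counters.
import Mathlib
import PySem

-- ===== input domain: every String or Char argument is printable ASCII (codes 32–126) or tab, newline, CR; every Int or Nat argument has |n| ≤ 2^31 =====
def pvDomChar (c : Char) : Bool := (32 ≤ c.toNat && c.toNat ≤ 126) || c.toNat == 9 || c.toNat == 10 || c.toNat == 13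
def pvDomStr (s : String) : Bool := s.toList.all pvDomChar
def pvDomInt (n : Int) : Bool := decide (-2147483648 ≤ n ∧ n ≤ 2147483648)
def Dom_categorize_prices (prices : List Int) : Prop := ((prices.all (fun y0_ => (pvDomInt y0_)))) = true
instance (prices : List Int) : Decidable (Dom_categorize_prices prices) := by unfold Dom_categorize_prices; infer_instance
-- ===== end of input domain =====

-- ===== PORT A =====
-- A: three separate comprehension scans, then a dict literal.
def categorize_prices (prices : List Int) : List (String × Int) :=
  let low_price : Int := ((prices.filter (fun p => p < 10000)).length : Int)
  let mid_price : Int := ((prices.filter (fun p => 10000 ≤ p ∧ p < 25000)).length : Int)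
  let high_price : Int := ((prices.filter (fun p => 25000 ≤ p)).length : Int)
  [("low", low_price), ("mid", mid_price), ("high", high_price)]

-- ===== PORT B =====
-- B: one pass accumulating three counters (low, mid, high).
def categorize_prices_alt (prices : List Int) : List (String × Int) :=
  let s := prices.foldl
    (fun (acc : Int × Int × Int) p =>
      if p < 10000 then (acc.1 + 1, acc.2.1, acc.2.2)
      else if p < 25000 then (acc.1, acc.2.1 + 1, acc.2.2)
      else (acc.1, acc.2.1, acc.2.2 + 1))
    (0, 0, 0)
  [("low", s.1), ("mid", s.2.1), ("high", s.2.2)]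

-- ===== PRECONDITION & SPEC =====
def Spec_categorize_prices (prices : List Int) (out : List (String × Int)) : Prop := out = categorize_prices_alt prices
instance (prices : List Int) (out : List (String × Int)) : Decidable (Spec_categorize_prices prices out) := by unfold Spec_categorize_prices; infer_instance

-- ===== CLAIM (what is proved, stated in full; the proofs are below) =====
def Claim_equal_categorize_prices : Prop := ∀ (prices : List Int), Dom_categorize_prices prices → Spec_categorize_prices prices (categorize_prices prices)

-- ===== LEMMAS AND PROOFS =====
-- Loop invariant: B's fold starting from (a,b,c) adds A's three filter-counts.
theorem pv_fold_counts (prices : List Int) (a b c : Int) :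
    prices.foldl
      (fun (acc : Int × Int × Int) p =>
        if p < 10000 then (acc.1 + 1, acc.2.1, acc.2.2)
        else if p < 25000 then (acc.1, acc.2.1 + 1, acc.2.2)
        else (acc.1, acc.2.1, acc.2.2 + 1))
      (a, b, c)
    = (a + ((prices.filter (fun p => p < 10000)).length : Int),
       b + ((prices.filter (fun p => 10000 ≤ p ∧ p < 25000)).length : Int),
       c + ((prices.filter (fun p => 25000 ≤ p)).length : Int)) := by
  induction prices generalizing a b c with
  | nil => simp
  | cons p ps ih =>
    simp only [List.foldl_cons, List.filter_cons]
    by_cases h1 : p < 10000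
    · rw [ih]
      simp only [h1, decide_true, if_pos h1]
      have h2 : ¬ (10000 ≤ p ∧ p < 25000) := by omega
      have h3 : ¬ (25000 ≤ p) := by omega
      simp only [h2, h3, decide_false]
      simp; omega
    · by_cases h2 : p < 25000
      · rw [if_neg h1, if_pos h2, ih]
        have h2' : (10000 ≤ p ∧ p < 25000) := by omega
        have h3 : ¬ (25000 ≤ p) := by omega
        simp only [h1, h2', h3, decide_true, decide_false]
        simp; omega
      · rw [if_neg h1, if_neg h2, ih]
        have h3 : (25000 ≤ p) := by omega
        have h2' : ¬ (10000 ≤ p ∧ p < 25000) := by omega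
        simp only [h1, h2', h3, decide_true, decide_false]
        simp; omega

-- ===== VERDICT (by name: the statement is the Claim_ definition above) =====
theorem categorize_prices_spec : Claim_equal_categorize_prices := by
  intro prices _
  unfold Spec_categorize_prices categorize_prices categorize_prices_alt
  rw [pv_fold_counts]
  simp
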